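-- pv_equiv track=rewrite | github.com/SteveThakur/Practice-Algorithms | Practice.py | Maxes
-- ===== SOURCE A (Python) =====
-- def Maxes(A):
--     M = []
--     index = 0
--
--     while index <= len(A)-2:
--         m = max(A[index: ])
--         M.append([m, A.index(m)])
--         index = A.index(m) + 1
--
--     return M
-- ===== SOURCE B (Python) =====
-- def Maxes(A):
--     n = len(A)
--     M = []
--     if n >= 2:
--         # rev[-1] is always the first-occurrence index of max(A[i+1:]) (built right to left)
--         rev = [n - 1]
--         for i in range(n - 2, -1, -1):
--             j = rev[-1]
--             rev.append(i if A[i] >= A[j] else j)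
--         smx = rev[::-1]          # smx[i] = first index of max(A[i:]) within A[i:]
--         i = 0
--         while i <= n - 2:
--             j = smx[i]
--             M.append([A[j], j])
--             i = j + 1
--     return M
-- ===== Notes on version B (the rewrite author's own statement) =====
-- stated objective: alternative
-- what changed: B precomputes a suffix-first-maximum index array in one right-to-left pass and then walks it with O(1) lookups per step, instead of A's repeated max() and list.index() scans of the remaining list in each loop iteration.
import Mathlib
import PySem

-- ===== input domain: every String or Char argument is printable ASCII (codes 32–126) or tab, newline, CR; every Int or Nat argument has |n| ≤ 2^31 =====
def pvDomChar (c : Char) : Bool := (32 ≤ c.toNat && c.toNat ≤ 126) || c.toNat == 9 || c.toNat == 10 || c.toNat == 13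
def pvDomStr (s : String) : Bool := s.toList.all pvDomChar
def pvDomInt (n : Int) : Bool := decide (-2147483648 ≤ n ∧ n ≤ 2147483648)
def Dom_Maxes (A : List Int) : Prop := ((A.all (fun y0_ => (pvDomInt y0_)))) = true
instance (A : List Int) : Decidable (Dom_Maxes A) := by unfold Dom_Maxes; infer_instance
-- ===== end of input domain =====

-- B replaces A's per-iteration max()/index() whole-list scans by a precomputed suffix-first-maximum
-- index array walked with O(1) lookups per step (objective: alternative; return value only).


-- ===== PORT A =====
-- the while loop, with fuel |A|+1 (enough for every terminating run: index strictly increases);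
-- Python's max(...) raising on empty / v not in list are the `none` branches (unreachable under Pre_)
def MaxesA_loop (A : List Int) : Nat → Int → List (List Int) → List (List Int)
  | 0, _, M => M
  | fuel + 1, index, M =>
    if index ≤ (A.length : Int) - 2 then
      match PySem.List.max? (PySem.List.slice A (some index) none) (fun y => y) with
      | none => M
      | some m =>
        match PySem.List.index? A m with
        | none => M
        | some j => MaxesA_loop A fuel ((j : Int) + 1) (M ++ [[m, (j : Int)]])
    else M

def Maxes (A : List Int) : List (List Int) := MaxesA_loop A (A.length + 1) 0 []

-- ===== PORT B =====
-- 'for i in range(n-2, -1, -1): j = rev[-1]; rev.append(i if A[i] >= A[j] else j)'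
def MaxesB_build (A : List Int) : List Nat :=
  (PySem.List.pyRange ((A.length : Int) - 2) (-1) (-1)).foldl
    (fun rev i =>
      let j := PySem.List.pyGetD rev (-1) 0
      rev ++ [if A.getD j 0 ≤ PySem.List.pyGetD A i 0 then i.toNat else j])
    [A.length - 1]

-- 'while i <= n - 2: j = smx[i]; M.append([A[j], j]); i = j + 1'  (same fuel bound as A's loop)
def MaxesB_loop (A : List Int) (smx : List Nat) : Nat → Nat → List (List Int) → List (List Int)
  | 0, _, M => M
  | fuel + 1, i, M =>
    if (i : Int) ≤ (A.length : Int) - 2 then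
      let j := smx.getD i 0
      MaxesB_loop A smx fuel (j + 1) (M ++ [[A.getD j 0, (j : Int)]])
    else M

def Maxes_alt (A : List Int) : List (List Int) :=
  if 2 ≤ A.length then
    MaxesB_loop A ((MaxesB_build A).reverse) (A.length + 1) 0 []
  else []

-- ===== PRECONDITION & SPEC =====
-- Pre_ excludes exactly the inputs on which Python A never returns (infinite loop): lists in which
-- the maximum of some suffix A[i:] with i ≤ len(A)-2 already occurs before position i, so that
-- 'index = A.index(m) + 1' sends the loop backwards forever.  A returns on every other input.
def Pre_Maxes (A : List Int) : Prop :=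
  ∀ i < A.length - 1, ∀ p < i,
    ¬ (A.getD p 0 ∈ A.drop i ∧ ∀ x ∈ A.drop i, x ≤ A.getD p 0)
instance (A : List Int) : Decidable (Pre_Maxes A) := by unfold Pre_Maxes; infer_instance

def pvWitness_Maxes : List Int := [3, 1, 4, 1, 5, 9, 2, 6]

def Spec_Maxes (A : List Int) (out : List (List Int)) : Prop := out = Maxes_alt A
instance (A : List Int) (out : List (List Int)) : Decidable (Spec_Maxes A out) := by unfold Spec_Maxes; infer_instance

-- ===== CLAIM (what is proved, stated in full; the proofs are below) =====
def Claim_equal_Maxes : Prop := ∀ (A : List Int), Dom_Maxes A → Pre_Maxes A → Spec_Maxes A (Maxes A)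

-- ===== LEMMAS AND PROOFS =====

-- proof-side reference function: first index (within A, absolute) of the maximum of A.drop i
def smxRec (A : List Int) (i : Nat) : Nat :=
  if h : i + 1 < A.length then
    let j := smxRec A (i + 1)
    if A.getD j 0 ≤ A.getD i 0 then i else j
  else i
termination_by A.length - i

lemma smxRec_ge (A : List Int) (i : Nat) : i ≤ smxRec A i := by
  rw [smxRec]
  split
  · next h =>
    dsimp only
    split
    · exact le_refl i
    · have := smxRec_ge A (i + 1); omega
  · exact le_refl i
termination_by A.length - i

lemma smxRec_lt (A : List Int) (i : Nat) (hi : i < A.length) : smxRec A i < A.length := by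
  rw [smxRec]
  split
  · next h =>
    dsimp only
    split
    · exact hi
    · exact smxRec_lt A (i + 1) h
  · exact hi
termination_by A.length - i

lemma smxRec_max (A : List Int) (i : Nat) :
    ∀ r, i ≤ r → r < A.length → A.getD r 0 ≤ A.getD (smxRec A i) 0 := by
  rw [smxRec]
  split
  · next h =>
    dsimp only
    intro r hir hrl
    rcases Nat.eq_or_lt_of_le hir with hri | hri
    · subst hri
      split
      · exact le_refl _
      · next hc => omega
    · have ih := smxRec_max A (i + 1) r (by omega) hrl
      split
      · next hc => exact le_trans ih hc
      · exact ih
  · next h =>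
    intro r hir hrl
    have : r = i := by omega
    subst this; exact le_refl _
termination_by A.length - i

lemma smxRec_first (A : List Int) (i : Nat) :
    ∀ r, i ≤ r → r < smxRec A i → A.getD r 0 < A.getD (smxRec A i) 0 := by
  rw [smxRec]
  split
  · next h =>
    dsimp only
    by_cases hc : A.getD (smxRec A (i + 1)) 0 ≤ A.getD i 0
    · rw [if_pos hc]; intro r hir hrj; omega
    · rw [if_neg hc]; intro r hir hrj
      rcases Nat.eq_or_lt_of_le hir with hri | hri
      · subst hri; omega
      · exact smxRec_first A (i + 1) r (by omega) hrj
  · intro r hir hrj; omega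
termination_by A.length - i

-- every element of A.drop i is bounded by the suffix maximum, and the maximum is a member
lemma drop_le_smx (A : List Int) (i : Nat) :
    ∀ x ∈ A.drop i, x ≤ A.getD (smxRec A i) 0 := by
  intro x hx
  obtain ⟨k, hk, hkx⟩ := List.mem_iff_getElem.mp hx
  have hlen : i + k < A.length := by
    have hd : (A.drop i).length = A.length - i := List.length_drop
    omega
  rw [List.getElem_drop] at hkx
  have := smxRec_max A i (i + k) (by omega) hlen
  rw [List.getD_eq_getElem A 0 hlen] at this
  omega

lemma smx_mem_drop (A : List Int) (i : Nat) (hi : i < A.length) :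
    A.getD (smxRec A i) 0 ∈ A.drop i := by
  have h1 := smxRec_ge A i
  have h2 := smxRec_lt A i hi
  have hk : smxRec A i - i < (A.drop i).length := by
    have hd : (A.drop i).length = A.length - i := List.length_drop
    omega
  apply List.mem_iff_getElem.mpr
  refine ⟨smxRec A i - i, hk, ?_⟩
  rw [List.getElem_drop, List.getD_eq_getElem A 0 h2]
  congr 1
  omega

lemma max_drop_eq (A : List Int) (i : Nat) (hi : i < A.length) :
    PySem.List.max? (A.drop i) (fun y => y) = some (A.getD (smxRec A i) 0) := by
  have hne : A.drop i ≠ [] := by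
    intro h
    have hd : (A.drop i).length = A.length - i := List.length_drop
    rw [h] at hd; simp at hd; omega
  cases hm : PySem.List.max? (A.drop i) (fun y => y) with
  | none => rw [PySem.List.max?_eq_none_iff] at hm; exact absurd hm hne
  | some m' =>
    have hmem := PySem.List.max?_mem hm
    have hmax : ∀ y ∈ A.drop i, y ≤ m' := by
      have := PySem.List.max?_isMax hm; simpa using this
    have h1 : m' ≤ A.getD (smxRec A i) 0 := drop_le_smx A i m' hmem
    have h2 : A.getD (smxRec A i) 0 ≤ m' := hmax _ (smx_mem_drop A i hi)
    rw [le_antisymm h1 h2]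

lemma index_eq_smx (A : List Int) (pre : Pre_Maxes A) (i : Nat) (hi : i + 2 ≤ A.length) :
    PySem.List.index? A (A.getD (smxRec A i) 0) = some (smxRec A i) := by
  have hil : i < A.length := by omega
  have hjl : smxRec A i < A.length := smxRec_lt A i hil
  have hmem : A.getD (smxRec A i) 0 ∈ A := List.mem_of_mem_drop (smx_mem_drop A i hil)
  have hsome : (PySem.List.index? A (A.getD (smxRec A i) 0)).isSome := by
    rw [PySem.List.index?_isSome_iff]; exact hmem
  obtain ⟨q, hq⟩ := Option.isSome_iff_exists.mp hsome
  obtain ⟨hql, hqv, hqfirst⟩ := PySem.List.getElem_of_index?_eq_some hq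
  -- q ≤ smxRec A i : q is the first occurrence
  have hle : q ≤ smxRec A i := by
    by_contra hgt
    exact hqfirst (smxRec A i) (by omega) (List.getD_eq_getElem A 0 hjl).symm
  -- smxRec A i ≤ q
  have hge : smxRec A i ≤ q := by
    by_contra hgt
    rw [Nat.not_le] at hgt
    by_cases hqi : q < i
    · -- contradicts Pre_: the suffix maximum occurs globally before i
      exact pre i (by omega) q hqi
        ⟨by rw [List.getD_eq_getElem A 0 (by omega : q < A.length), hqv]
            exact smx_mem_drop A i hil,
         by rw [List.getD_eq_getElem A 0 (by omega : q < A.length), hqv]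
            exact drop_le_smx A i⟩
    · have := smxRec_first A i q (by omega) hgt
      rw [List.getD_eq_getElem A 0 (by omega : q < A.length), hqv] at this
      omega
  have : q = smxRec A i := by omega
  rw [this] at hq; exact hq

-- the fold of MaxesB_build, processed down to start value t-1, fills the table up to index t
lemma build_fold (A : List Int) (hn : 2 ≤ A.length) :
    ∀ t : Nat, t ≤ A.length - 1 →
      (PySem.List.pyRange ((t : Int) - 1) (-1) (-1)).foldl
        (fun rev i =>
          let j := PySem.List.pyGetD rev (-1) 0
          rev ++ [if A.getD j 0 ≤ PySem.List.pyGetD A i 0 then i.toNat else j])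
        ((List.range (A.length - t)).map (fun k => smxRec A (A.length - 1 - k)))
      = (List.range A.length).map (fun k => smxRec A (A.length - 1 - k)) := by
  intro t
  induction t with
  | zero =>
    intro _
    rw [PySem.List.pyRange_neg_one_eq_nil (by omega)]
    simp
  | succ t ih =>
    intro ht
    have hcons : PySem.List.pyRange (((t + 1 : Nat) : Int) - 1) (-1) (-1)
        = (t : Int) :: PySem.List.pyRange ((t : Int) - 1) (-1) (-1) := by
      have he : ((t + 1 : Nat) : Int) - 1 = (t : Int) := by push_cast; ring
      rw [he, PySem.List.pyRange_neg_one_cons (by omega)]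
    have hsplit : (List.range (A.length - (t + 1))).map (fun k => smxRec A (A.length - 1 - k))
        = (List.range (A.length - t - 2)).map (fun k => smxRec A (A.length - 1 - k))
          ++ [smxRec A (t + 1)] := by
      have h1 : A.length - (t + 1) = (A.length - t - 2) + 1 := by omega
      rw [h1, List.range_succ, List.map_append]
      have h2 : A.length - 1 - (A.length - t - 2) = t + 1 := by omega
      simp [h2]
    have ht1 : t + 1 < A.length := by omega
    have hsm : smxRec A t
        = if A.getD (smxRec A (t + 1)) 0 ≤ A.getD t 0 then t else smxRec A (t + 1) := by
      conv_lhs => rw [smxRec, dif_pos ht1]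
    have hjoin : (List.range (A.length - t - 2)).map (fun k => smxRec A (A.length - 1 - k))
          ++ [smxRec A (t + 1)] ++ [smxRec A t]
        = (List.range (A.length - t)).map (fun k => smxRec A (A.length - 1 - k)) := by
      have h1 : A.length - t = (A.length - t - 2) + 1 + 1 := by omega
      rw [h1, List.range_succ, List.range_succ, List.map_append, List.map_append]
      have h2 : A.length - 1 - (A.length - t - 2) = t + 1 := by omega
      have h3 : A.length - 1 - (A.length - t - 2 + 1) = t := by omega
      simp [h2, h3]
    rw [hcons, List.foldl_cons]
    dsimp only
    rw [hsplit, PySem.List.pyGetD_neg_one_append_singleton,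
      show PySem.List.pyGetD A (t : Int) 0 = A.getD t 0 by simp,
      show ((t : Int)).toNat = t by omega, ← hsm, hjoin]
    exact ih (by omega)

lemma build_eq (A : List Int) (hn : 2 ≤ A.length) :
    MaxesB_build A = (List.range A.length).map (fun k => smxRec A (A.length - 1 - k)) := by
  unfold MaxesB_build
  have hstart : (A.length : Int) - 2 = ((A.length - 1 : Nat) : Int) - 1 := by
    push_cast [Nat.cast_sub (by omega : 1 ≤ A.length)]; ring
  have hinit : [A.length - 1]
      = (List.range (A.length - (A.length - 1))).map (fun k => smxRec A (A.length - 1 - k)) := by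
    have h1 : A.length - (A.length - 1) = 1 := by omega
    rw [h1]
    have h2 : smxRec A (A.length - 1) = A.length - 1 := by
      rw [smxRec, dif_neg (by omega)]
    simp [List.range_succ, h2]
  rw [hstart, hinit]
  exact build_fold A hn (A.length - 1) (le_refl _)

lemma smxL_getD (A : List Int) (hn : 2 ≤ A.length) (i : Nat) (hi : i < A.length) :
    ((MaxesB_build A).reverse).getD i 0 = smxRec A i := by
  rw [build_eq A hn]
  have hlen : ((List.range A.length).map (fun k => smxRec A (A.length - 1 - k))).length
      = A.length := by simp
  have hirev : i < ((List.range A.length).map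
      (fun k => smxRec A (A.length - 1 - k))).reverse.length := by simpa using hi
  rw [List.getD_eq_getElem _ 0 hirev, List.getElem_reverse]
  have h1 : ((List.range A.length).map (fun k => smxRec A (A.length - 1 - k))).length - 1 - i
      < A.length := by omega
  simp only [List.getElem_map, List.getElem_range]
  congr 1
  simp only [hlen]
  omega

lemma loop_eq (A : List Int) (pre : Pre_Maxes A) :
    ∀ fuel (i : Nat) (M : List (List Int)), i ≤ A.length →
      MaxesA_loop A fuel (i : Int) M = MaxesB_loop A ((MaxesB_build A).reverse) fuel i M := by
  intro fuel
  induction fuel with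
  | zero => intro i M _; rfl
  | succ fuel ih =>
    intro i M hi
    by_cases hc : (i : Int) ≤ (A.length : Int) - 2
    · have hi2 : i + 2 ≤ A.length := by omega
      have hil : i < A.length := by omega
      rw [MaxesA_loop, MaxesB_loop, if_pos hc, if_pos hc]
      rw [PySem.List.slice_from_natCast, max_drop_eq A i hil]
      dsimp only
      rw [index_eq_smx A pre i hi2]
      dsimp only
      rw [smxL_getD A (by omega) i hil]
      have hrec : ((smxRec A i : Nat) : Int) + 1 = (((smxRec A i + 1 : Nat)) : Int) := by
        push_cast; ring
      rw [hrec]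
      exact ih (smxRec A i + 1) _ (smxRec_lt A i hil)
    · rw [MaxesA_loop, MaxesB_loop, if_neg hc, if_neg hc]

-- ===== VERDICT (by name: the statement is the Claim_ definition above) =====
theorem Maxes_spec : Claim_equal_Maxes := by
  intro A _ pre
  unfold Spec_Maxes Maxes Maxes_alt
  by_cases hn : 2 ≤ A.length
  · rw [if_pos hn, show (0 : Int) = ((0 : Nat) : Int) from rfl,
      loop_eq A pre (A.length + 1) 0 [] (by omega)]
  · rw [if_neg hn]
    have h0 : ¬ ((0 : Int) ≤ (A.length : Int) - 2) := by omega
    rw [MaxesA_loop, if_neg h0]
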